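-- pv_equiv track=rewrite | github.com/posl/comment_recommendation | script/split_gen/1_time/en/267_B/8.py | isSplit
-- ===== SOURCE A (Python) =====
-- def isSplit(S):
--     if S[0] == '0':
--         return 'No'
--     else:
--         for i in range(len(S)):
--             for j in range(len(S)):
--                 if i != j:
--                     if S[i] == '1' and S[j] == '1':
--                         if i < j:
--                             for k in range(i+1, j):
--                                 if S[k] == '0':
--                                     return 'Yes'
--                         else:
--                             for k in range(j+1, i):
--                                 if S[k] == '0':
--                                     return 'Yes'
--         return 'No'
-- ===== SOURCE B (Python) =====
-- def isSplit(S):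
--     if S[0] == '0':
--         return 'No'
--     seen_one = False
--     zero_after = False
--     for c in S:
--         if c == '1':
--             if zero_after:
--                 return 'Yes'
--             seen_one = True
--         elif c == '0' and seen_one:
--             zero_after = True
--     return 'No'
-- ===== Notes on version B (the rewrite author's own statement) =====
-- stated objective: faster
-- what changed: Replaced the triple nested index loops (all pairs of one-positions, then a scan between them) by a single left-to-right state-machine pass tracking whether a one has been seen and whether a zero followed it.
import Mathlib
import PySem

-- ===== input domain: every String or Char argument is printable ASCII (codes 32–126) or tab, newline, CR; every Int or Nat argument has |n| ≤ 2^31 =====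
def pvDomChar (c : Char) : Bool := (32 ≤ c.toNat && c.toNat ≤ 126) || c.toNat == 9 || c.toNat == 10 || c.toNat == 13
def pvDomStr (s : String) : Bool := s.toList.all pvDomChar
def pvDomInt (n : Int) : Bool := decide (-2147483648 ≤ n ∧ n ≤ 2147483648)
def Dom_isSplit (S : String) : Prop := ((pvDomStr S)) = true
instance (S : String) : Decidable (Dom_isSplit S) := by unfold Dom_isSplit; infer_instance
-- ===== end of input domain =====

-- B replaces A's triple nested index loops by a single left-to-right state-machine pass (measurably faster asymptotically).
-- Pre_ excludes only the empty string, on which Python A raises IndexError (S[0]).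


-- ===== PORT A =====
-- A's triple nested loop: for i, for j, if i≠j and S[i]=S[j]='1', scan between them for '0'
def isSplitLoop (cs : List Char) : Bool :=
  (List.range cs.length).any (fun i =>
    (List.range cs.length).any (fun j =>
      if i ≠ j then
        if cs.getD i ' ' = '1' ∧ cs.getD j ' ' = '1' then
          if i < j then
            (List.range' (i+1) (j - (i+1))).any (fun k => cs.getD k ' ' = '0')
          else
            (List.range' (j+1) (i - (j+1))).any (fun k => cs.getD k ' ' = '0')
        else false
      else false))

def isSplit (S : String) : String :=
  match PySem.Str.pyGet? S 0 with
  | none => "No"   -- Python raises IndexError here (S = ""); excluded by Pre_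
  | some c0 =>
    if c0 = '0' then "No"
    else if isSplitLoop S.toList then "Yes" else "No"

-- ===== PORT B =====
-- B's single pass: state = (seen a '1', seen a '0' after a '1'); early return 'Yes' on a '1' after both
def altLoop : List Char → Bool → Bool → Bool
  | [], _, _ => false
  | c :: rest, seenOne, zeroAfter =>
    if c = '1' then
      if zeroAfter then true
      else altLoop rest true zeroAfter
    else if c = '0' ∧ seenOne = true then altLoop rest seenOne true
    else altLoop rest seenOne zeroAfter

def isSplit_alt (S : String) : String :=
  match PySem.Str.pyGet? S 0 with
  | none => "No"   -- Python raises IndexError here (S = ""); excluded by Pre_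
  | some c0 =>
    if c0 = '0' then "No"
    else if altLoop S.toList false false then "Yes" else "No"

-- ===== PRECONDITION & SPEC =====
-- Pre_ excludes only the empty string, on which Python A (and B) raise IndexError at S[0].
def Pre_isSplit (S : String) : Prop := S ≠ ""
instance (S : String) : Decidable (Pre_isSplit S) := by unfold Pre_isSplit; infer_instance
def pvWitness_isSplit : String := "1201"

def Spec_isSplit (S : String) (out : String) : Prop := out = isSplit_alt S
instance (S : String) (out : String) : Decidable (Spec_isSplit S out) := by unfold Spec_isSplit; infer_instance

-- ===== CLAIM (what is proved, stated in full; the proofs are below) =====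
def Claim_equal_isSplit : Prop := ∀ (S : String), Dom_isSplit S → Pre_isSplit S → Spec_isSplit S (isSplit S)

-- ===== LEMMAS AND PROOFS =====

-- index-form specifications of the three machine states
def Q2 (cs : List Char) : Prop := ∃ j, j < cs.length ∧ cs.getD j ' ' = '1'
def Q1 (cs : List Char) : Prop :=
  ∃ k j, k < j ∧ j < cs.length ∧ cs.getD k ' ' = '0' ∧ cs.getD j ' ' = '1'
def Q0 (cs : List Char) : Prop :=
  ∃ i k j, i < k ∧ k < j ∧ j < cs.length ∧
    cs.getD i ' ' = '1' ∧ cs.getD k ' ' = '0' ∧ cs.getD j ' ' = '1'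

lemma altLoop_true_iff_Q2 (cs : List Char) (s : Bool) : altLoop cs s true = true ↔ Q2 cs := by
  induction cs generalizing s with
  | nil => simp [altLoop, Q2]
  | cons c rest ih =>
    simp only [altLoop]
    by_cases h1 : c = '1'
    · subst h1
      simp only [if_true]
      constructor
      · intro _; exact ⟨0, by simp⟩
      · intro _; trivial
    · rw [if_neg h1]
      have key : Q2 (c :: rest) ↔ Q2 rest := by
        constructor
        · rintro ⟨j, hj, hv⟩
          cases j with
          | zero => simp at hv; exact absurd hv h1
          | succ j => exact ⟨j, by simpa using hj, by simpa using hv⟩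
        · rintro ⟨j, hj, hv⟩
          exact ⟨j+1, by simpa using hj, by simpa using hv⟩
      split_ifs with h0
      · rw [ih, key]
      · rw [ih, key]

lemma Q1_of_Q2_shift (cs : List Char) : Q2 cs → Q1 ('0' :: cs) := by
  rintro ⟨j, hj, hv⟩
  exact ⟨0, j+1, by omega, by simpa using hj, by simp, by simpa using hv⟩

lemma altLoop_true_false_iff_Q1 (cs : List Char) : altLoop cs true false = true ↔ Q1 cs := by
  induction cs with
  | nil => simp [altLoop, Q1]
  | cons c rest ih =>
    simp only [altLoop]
    by_cases h1 : c = '1'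
    · subst h1
      simp only [if_true, if_neg (by decide : ¬ (false = true))]
      rw [ih]
      constructor
      · rintro ⟨k, j, hkj, hj, hk0, hj1⟩
        exact ⟨k+1, j+1, by omega, by simpa using hj, by simpa using hk0, by simpa using hj1⟩
      · rintro ⟨k, j, hkj, hj, hk0, hj1⟩
        cases k with
        | zero => simp at hk0
        | succ k =>
          cases j with
          | zero => omega
          | succ j => exact ⟨k, j, by omega, by simpa using hj, by simpa using hk0, by simpa using hj1⟩
    · rw [if_neg h1]
      by_cases h0 : c = '0'
      · subst h0
        rw [if_pos ⟨rfl, trivial⟩, altLoop_true_iff_Q2]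
        constructor
        · exact Q1_of_Q2_shift rest
        · rintro ⟨k, j, hkj, hj, hk0, hj1⟩
          cases j with
          | zero => omega
          | succ j => exact ⟨j, by simpa using hj, by simpa using hj1⟩
      · rw [if_neg (by simp [h0]), ih]
        constructor
        · rintro ⟨k, j, hkj, hj, hk0, hj1⟩
          exact ⟨k+1, j+1, by omega, by simpa using hj, by simpa using hk0, by simpa using hj1⟩
        · rintro ⟨k, j, hkj, hj, hk0, hj1⟩
          cases k with
          | zero => simp at hk0; exact absurd hk0 h0
          | succ k =>
            cases j with
            | zero => omega
            | succ j => exact ⟨k, j, by omega, by simpa using hj, by simpa using hk0, by simpa using hj1⟩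

lemma altLoop_false_false_iff_Q0 (cs : List Char) : altLoop cs false false = true ↔ Q0 cs := by
  induction cs with
  | nil => simp [altLoop, Q0]
  | cons c rest ih =>
    simp only [altLoop]
    by_cases h1 : c = '1'
    · subst h1
      simp only [if_true, if_neg (by decide : ¬ (false = true))]
      rw [altLoop_true_false_iff_Q1]
      constructor
      · rintro ⟨k, j, hkj, hj, hk0, hj1⟩
        exact ⟨0, k+1, j+1, by omega, by omega, by simpa using hj, by simp,
          by simpa using hk0, by simpa using hj1⟩
      · rintro ⟨i, k, j, hik, hkj, hj, hi1, hk0, hj1⟩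
        cases k with
        | zero => omega
        | succ k =>
          cases j with
          | zero => omega
          | succ j => exact ⟨k, j, by omega, by simpa using hj, by simpa using hk0, by simpa using hj1⟩
    · rw [if_neg h1, if_neg (by simp : ¬ (c = '0' ∧ false = true)), ih]
      constructor
      · rintro ⟨i, k, j, hik, hkj, hj, hi1, hk0, hj1⟩
        exact ⟨i+1, k+1, j+1, by omega, by omega, by simpa using hj,
          by simpa using hi1, by simpa using hk0, by simpa using hj1⟩
      · rintro ⟨i, k, j, hik, hkj, hj, hi1, hk0, hj1⟩
        cases i with
        | zero => simp at hi1; exact absurd hi1 h1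
        | succ i =>
          cases k with
          | zero => omega
          | succ k =>
            cases j with
            | zero => omega
            | succ j =>
              exact ⟨i, k, j, by omega, by omega, by simpa using hj,
                by simpa using hi1, by simpa using hk0, by simpa using hj1⟩

lemma isSplitLoop_iff_Q0 (cs : List Char) : isSplitLoop cs = true ↔ Q0 cs := by
  simp only [isSplitLoop, List.any_eq_true, List.mem_range]
  constructor
  · rintro ⟨i, hi, j, hj, h⟩
    by_cases hij : i ≠ j
    · rw [if_pos hij] at h
      by_cases hones : cs.getD i ' ' = '1' ∧ cs.getD j ' ' = '1'
      · rw [if_pos hones] at h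
        by_cases hlt : i < j
        · rw [if_pos hlt] at h
          simp only [List.any_eq_true, List.mem_range'_1] at h
          obtain ⟨k, ⟨hk1, hk2⟩, hk0⟩ := h
          exact ⟨i, k, j, by omega, by omega, hj, hones.1, by simpa using hk0, hones.2⟩
        · rw [if_neg hlt] at h
          simp only [List.any_eq_true, List.mem_range'_1] at h
          obtain ⟨k, ⟨hk1, hk2⟩, hk0⟩ := h
          exact ⟨j, k, i, by omega, by omega, hi, hones.2, by simpa using hk0, hones.1⟩
      · rw [if_neg hones] at h; exact absurd h (by simp)
    · rw [if_neg hij] at h; exact absurd h (by simp)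
  · rintro ⟨i, k, j, hik, hkj, hj, hi1, hk0, hj1⟩
    refine ⟨i, by omega, j, hj, ?_⟩
    rw [if_pos (by omega : i ≠ j), if_pos ⟨hi1, hj1⟩, if_pos (by omega : i < j)]
    simp only [List.any_eq_true, List.mem_range'_1]
    exact ⟨k, ⟨by omega, by omega⟩, by simpa using hk0⟩

lemma loops_agree (cs : List Char) : isSplitLoop cs = altLoop cs false false := by
  rw [Bool.eq_iff_iff, isSplitLoop_iff_Q0, altLoop_false_false_iff_Q0 cs]

-- ===== VERDICT (by name: the statement is the Claim_ definition above) =====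
theorem isSplit_spec : Claim_equal_isSplit := by
  intro S _ _
  unfold Spec_isSplit isSplit isSplit_alt
  cases h : PySem.Str.pyGet? S 0 with
  | none => rfl
  | some c0 => simp [loops_agree]
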